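-- pv_equiv track=rewrite | github.com/Aditya-a404a/Codeforces-1 | A_Fashionable_Array.py | solve
-- ===== SOURCE A (Python) =====
-- def solve(A):
--
--     ans = 2**32
--     A.sort()
--     for x in range(len(A)):
--         for y in range(len(A)):
--             if (A[x]+A[y])%2==0:
--                 ans = min(ans,x+len(A)-y-1)
--     return ans
--     pass
-- ===== SOURCE B (Python) =====
-- def solve(A):
--     # single pass over the sorted list tracking first/last index of each parity
--     # (like A, sorts the argument in place)
--     A.sort()
--     n = len(A)
--     fe = le = fo = lo = None
--     for i, v in enumerate(A):
--         if v % 2 == 0: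
--             if fe is None:
--                 fe = i
--             le = i
--         else:
--             if fo is None:
--                 fo = i
--             lo = i
--     ans = 2**32
--     if fe is not None:
--         ans = min(ans, fe + n - 1 - le)
--     if fo is not None:
--         ans = min(ans, fo + n - 1 - lo)
--     return ans
-- ===== Notes on version B (the rewrite author's own statement) =====
-- stated objective: faster
-- what changed: Replaced the O(n^2) scan over all index pairs with a single pass over the sorted list recording the first and last index of each parity, then combining first_p + n - 1 - last_p per parity.
import Mathlib
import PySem

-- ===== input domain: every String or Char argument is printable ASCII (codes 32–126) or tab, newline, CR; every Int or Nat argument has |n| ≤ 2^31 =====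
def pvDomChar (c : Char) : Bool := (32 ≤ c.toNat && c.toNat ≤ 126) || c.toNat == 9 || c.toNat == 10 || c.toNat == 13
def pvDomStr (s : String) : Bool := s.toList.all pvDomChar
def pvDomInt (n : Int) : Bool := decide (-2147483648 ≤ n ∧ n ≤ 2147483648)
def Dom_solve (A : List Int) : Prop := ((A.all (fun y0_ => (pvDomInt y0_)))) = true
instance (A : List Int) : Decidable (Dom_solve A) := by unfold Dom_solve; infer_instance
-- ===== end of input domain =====

-- B replaces A's quadratic pair scan by one pass over the sorted list recording first/last
-- index of each parity (faster, asymptotically).  Both Pythons sort the argument in place;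
-- the equivalence proved here is about the RETURN value only.

-- ===== PORT A =====
def solve (A : List Int) : Int :=
  let ans : Int := 2 ^ 32
  let A := PySem.List.sorted A (fun x => x) false
  (PySem.List.pyRange 0 (A.length : Int) 1).foldl (fun ans x =>
    (PySem.List.pyRange 0 (A.length : Int) 1).foldl (fun ans y =>
      if PySem.Int.mod (PySem.List.pyGetD A x 0 + PySem.List.pyGetD A y 0) 2 = 0 then
        min ans (x + (A.length : Int) - y - 1)
      else ans) ans) ans

-- ===== PORT B =====
-- one loop step of Source B: update (fe, le, fo, lo) with the pair (i, v)
def solveAltStep (st : Option Int × Option Int × Option Int × Option Int) (iv : Int × Int) :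
    Option Int × Option Int × Option Int × Option Int :=
  if PySem.Int.mod iv.2 2 = 0 then
    ((if st.1.isNone then some iv.1 else st.1), some iv.1, st.2.2.1, st.2.2.2)
  else
    (st.1, st.2.1, (if st.2.2.1.isNone then some iv.1 else st.2.2.1), some iv.1)

def solve_alt (A : List Int) : Int :=
  let As := PySem.List.sorted A (fun x => x) false
  let n : Int := As.length
  let st := (PySem.List.enumerate As 0).foldl solveAltStep (none, none, none, none)
  let ans : Int := 2 ^ 32
  let ans := match st.1, st.2.1 with
    | some f, some e => min ans (f + n - 1 - e)
    | _, _ => ans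
  match st.2.2.1, st.2.2.2 with
  | some f, some e => min ans (f + n - 1 - e)
  | _, _ => ans

-- ===== PRECONDITION & SPEC =====
def Spec_solve (A : List Int) (out : Int) : Prop := out = solve_alt A
instance (A : List Int) (out : Int) : Decidable (Spec_solve A out) := by unfold Spec_solve; infer_instance

-- ===== CLAIM (what is proved, stated in full; the proofs are below) =====
def Claim_equal_solve : Prop := ∀ (A : List Int), Dom_solve A → Spec_solve A (solve A)

-- ===== LEMMAS AND PROOFS =====

-- the core of A after sorting, as a function of the sorted list
def coreA (l : List Int) : Int :=
  (PySem.List.pyRange 0 (l.length : Int) 1).foldl (fun ans x =>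
    (PySem.List.pyRange 0 (l.length : Int) 1).foldl (fun ans y =>
      if PySem.Int.mod (PySem.List.pyGetD l x 0 + PySem.List.pyGetD l y 0) 2 = 0 then
        min ans (x + (l.length : Int) - y - 1)
      else ans) ans) (2 ^ 32)

def coreB (l : List Int) : Int :=
  let n : Int := l.length
  let st := (PySem.List.enumerate l 0).foldl solveAltStep (none, none, none, none)
  let ans : Int := 2 ^ 32
  let ans := match st.1, st.2.1 with
    | some f, some e => min ans (f + n - 1 - e)
    | _, _ => ans
  match st.2.2.1, st.2.2.2 with
  | some f, some e => min ans (f + n - 1 - e)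
  | _, _ => ans

lemma solve_eq_coreA (A : List Int) :
    solve A = coreA (PySem.List.sorted A (fun x => x) false) := rfl

lemma solve_alt_eq_coreB (A : List Int) :
    solve_alt A = coreB (PySem.List.sorted A (fun x => x) false) := rfl

-- arithmetic facts about Python mod 2
lemma mod2_cases (a : Int) : PySem.Int.mod a 2 = 0 ∨ PySem.Int.mod a 2 = 1 := by
  rw [PySem.Int.mod_eq_emod_of_pos (a := a) (by norm_num)]; omega

lemma mod2_add (a b : Int) :
    PySem.Int.mod (a + b) 2 = 0 ↔ PySem.Int.mod a 2 = PySem.Int.mod b 2 := by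
  rw [PySem.Int.mod_eq_emod_of_pos (a := a) (by norm_num),
      PySem.Int.mod_eq_emod_of_pos (a := b) (by norm_num),
      PySem.Int.mod_eq_emod_of_pos (a := a + b) (by norm_num)]
  omega

-- generic facts about folds that only ever decrease the accumulator
lemma foldl_contract {α : Type} (g : Int → α → Int) (xs : List α)
    (h : ∀ a x, g a x ≤ a) (a : Int) : xs.foldl g a ≤ a := by
  induction xs generalizing a with
  | nil => simp
  | cons x xs ih => exact le_trans (ih (g a x)) (h a x)

lemma foldl_le_of_mem {α : Type} (g : Int → α → Int) (xs : List α)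
    (h : ∀ a x, g a x ≤ a) (x0 : α) (hx : x0 ∈ xs) (b : Int)
    (hstep : ∀ a, g a x0 ≤ b) (a : Int) : xs.foldl g a ≤ b := by
  induction xs generalizing a with
  | nil => cases hx
  | cons x xs ih =>
    rcases List.mem_cons.mp hx with h0 | h0
    · subst h0
      exact le_trans (foldl_contract g xs h (g a x0)) (hstep a)
    · exact ih h0 (g a x)

lemma foldl_preserve {α : Type} (g : Int → α → Int) (Q : Int → Prop) (xs : List α)
    (h : ∀ a x, x ∈ xs → g a x = a ∨ Q (g a x)) (a : Int) :
    xs.foldl g a = a ∨ Q (xs.foldl g a) := by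
  induction xs generalizing a with
  | nil => exact Or.inl rfl
  | cons x xs ih =>
    have hh : ∀ a' x', x' ∈ xs → g a' x' = a' ∨ Q (g a' x') := fun a' x' hm =>
      h a' x' (List.mem_cons_of_mem _ hm)
    rcases h a x (List.mem_cons_self) with h0 | h0
    · simpa [List.foldl, h0] using ih hh a
    · rcases ih hh (g a x) with h1 | h1
      · exact Or.inr (by simpa [List.foldl, h1] using h0)
      · exact Or.inr h1

-- the inner "if P x then min acc (f x) else acc" fold
lemma foldl_minif_le_init {α : Type} (P : α → Prop) [DecidablePred P] (f : α → Int)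
    (xs : List α) (a : Int) :
    xs.foldl (fun acc x => if P x then min acc (f x) else acc) a ≤ a := by
  apply foldl_contract
  intro a x
  split <;> simp

lemma foldl_minif_le_mem {α : Type} (P : α → Prop) [DecidablePred P] (f : α → Int)
    (xs : List α) (x0 : α) (hx : x0 ∈ xs) (hP : P x0) (a : Int) :
    xs.foldl (fun acc x => if P x then min acc (f x) else acc) a ≤ f x0 := by
  apply foldl_le_of_mem _ _ _ x0 hx
  · intro a; simp [hP]
  · intro a x; split <;> simp

lemma foldl_minif_cases {α : Type} (P : α → Prop) [DecidablePred P] (f : α → Int)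
    (xs : List α) (a : Int) :
    xs.foldl (fun acc x => if P x then min acc (f x) else acc) a = a ∨
      ∃ x ∈ xs, P x ∧ xs.foldl (fun acc x => if P x then min acc (f x) else acc) a = f x := by
  rcases foldl_preserve _ (fun r => ∃ x ∈ xs, P x ∧ r = f x) xs
      (by
        intro a x hm
        by_cases hP : P x
        · rcases le_total a (f x) with hle | hle
          · exact Or.inl (show (if P x then min a (f x) else a) = a by
              rw [if_pos hP]; exact min_eq_left hle)
          · exact Or.inr ⟨x, hm, hP, show (if P x then min a (f x) else a) = f x by
              rw [if_pos hP]; exact min_eq_right hle⟩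
        · exact Or.inl (show (if P x then min a (f x) else a) = a from if_neg hP)) a with h | h
  · exact Or.inl h
  · rcases h with ⟨x, hm, hP, he⟩
    exact Or.inr ⟨x, hm, hP, he⟩

-- invariant of Source B's pass: (F, L) are the first/last index of parity p, if any
def GoodPL (p : Int) (l : List Int) (F L : Option Int) : Prop :=
  (F = none ∧ L = none ∧ ∀ k : Nat, k < l.length → PySem.Int.mod (l.getD k 0) 2 ≠ p) ∨
  (∃ kf ke : Nat, F = some (kf : Int) ∧ L = some (ke : Int) ∧ kf < l.length ∧ ke < l.length ∧
    PySem.Int.mod (l.getD kf 0) 2 = p ∧ PySem.Int.mod (l.getD ke 0) 2 = p ∧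
    ∀ k : Nat, k < l.length → PySem.Int.mod (l.getD k 0) 2 = p → kf ≤ k ∧ k ≤ ke)

lemma GoodPL_extend_other (p : Int) (xs : List Int) (x : Int) (F L : Option Int)
    (hx : PySem.Int.mod x 2 ≠ p) (h : GoodPL p xs F L) : GoodPL p (xs ++ [x]) F L := by
  rcases h with ⟨h1, h2, h3⟩ | ⟨kf, ke, h1, h2, h3, h4, h5, h6, h7⟩
  · refine Or.inl ⟨h1, h2, ?_⟩
    intro k hk
    rw [List.length_append, List.length_singleton] at hk
    by_cases hk' : k < xs.length
    · rw [List.getD_append _ _ _ _ hk']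
      exact h3 k hk'
    · have hkk : k = xs.length := by omega
      subst hkk
      rw [List.getD_append_right _ _ _ _ (le_refl _)]
      simp only [Nat.sub_self, List.getD_cons_zero]
      exact hx
  · refine Or.inr ⟨kf, ke, h1, h2, ?_, ?_, ?_, ?_, ?_⟩
    · rw [List.length_append, List.length_singleton]; omega
    · rw [List.length_append, List.length_singleton]; omega
    · rw [List.getD_append _ _ _ _ h3]; exact h5
    · rw [List.getD_append _ _ _ _ h4]; exact h6
    · intro k hk hp
      rw [List.length_append, List.length_singleton] at hk
      by_cases hk' : k < xs.length
      · rw [List.getD_append _ _ _ _ hk'] at hp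
        exact h7 k hk' hp
      · have hkk : k = xs.length := by omega
        subst hkk
        rw [List.getD_append_right _ _ _ _ (le_refl _)] at hp
        simp only [Nat.sub_self, List.getD_cons_zero] at hp
        exact absurd hp hx

lemma GoodPL_extend_same (p : Int) (xs : List Int) (x : Int) (F L : Option Int)
    (hx : PySem.Int.mod x 2 = p) (h : GoodPL p xs F L) :
    GoodPL p (xs ++ [x]) (if F.isNone then some (xs.length : Int) else F)
      (some (xs.length : Int)) := by
  rcases h with ⟨h1, h2, h3⟩ | ⟨kf, ke, h1, h2, h3, h4, h5, h6, h7⟩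
  · subst h1
    refine Or.inr ⟨xs.length, xs.length, by simp, rfl, by simp, by simp, ?_, ?_, ?_⟩
    · rw [List.getD_append_right _ _ _ _ (le_refl _)]
      simp only [Nat.sub_self, List.getD_cons_zero]; exact hx
    · rw [List.getD_append_right _ _ _ _ (le_refl _)]
      simp only [Nat.sub_self, List.getD_cons_zero]; exact hx
    · intro k hk hp
      rw [List.length_append, List.length_singleton] at hk
      by_cases hk' : k < xs.length
      · rw [List.getD_append _ _ _ _ hk'] at hp
        exact absurd hp (h3 k hk')
      · omega
  · subst h1
    refine Or.inr ⟨kf, xs.length, by simp, rfl, ?_, by simp, ?_, ?_, ?_⟩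
    · rw [List.length_append, List.length_singleton]; omega
    · rw [List.getD_append _ _ _ _ h3]; exact h5
    · rw [List.getD_append_right _ _ _ _ (le_refl _)]
      simp only [Nat.sub_self, List.getD_cons_zero]; exact hx
    · intro k hk hp
      rw [List.length_append, List.length_singleton] at hk
      by_cases hk' : k < xs.length
      · exact ⟨(h7 k hk' (by rwa [List.getD_append _ _ _ _ hk'] at hp)).1, by omega⟩
      · have hkk : k = xs.length := by omega
        subst hkk
        exact ⟨by omega, le_refl _⟩

lemma st_spec (l : List Int) :
    GoodPL 0 l ((PySem.List.enumerate l 0).foldl solveAltStep (none, none, none, none)).1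
      ((PySem.List.enumerate l 0).foldl solveAltStep (none, none, none, none)).2.1 ∧
    GoodPL 1 l ((PySem.List.enumerate l 0).foldl solveAltStep (none, none, none, none)).2.2.1
      ((PySem.List.enumerate l 0).foldl solveAltStep (none, none, none, none)).2.2.2 := by
  induction l using List.reverseRecOn with
  | nil =>
    refine ⟨Or.inl ⟨?_, ?_, ?_⟩, Or.inl ⟨?_, ?_, ?_⟩⟩ <;> simp [PySem.List.enumerate_nil]
  | append_singleton xs x ih =>
    obtain ⟨ih0, ih1⟩ := ih
    have hidx : PySem.List.enumerate (xs ++ [x]) 0 =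
        PySem.List.enumerate xs 0 ++ [((xs.length : Int), x)] := by
      rw [PySem.List.enumerate_append]
      simp [PySem.List.enumerate_cons, PySem.List.enumerate_nil]
    rw [hidx, List.foldl_append]
    rcases mod2_cases x with hq | hq
    · have hstep : List.foldl solveAltStep
          ((PySem.List.enumerate xs 0).foldl solveAltStep (none, none, none, none))
          [((xs.length : Int), x)] =
          ((if ((PySem.List.enumerate xs 0).foldl solveAltStep (none, none, none, none)).1.isNone
              then some (xs.length : Int)
              else ((PySem.List.enumerate xs 0).foldl solveAltStep (none, none, none, none)).1),
            some (xs.length : Int),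
            ((PySem.List.enumerate xs 0).foldl solveAltStep (none, none, none, none)).2.2.1,
            ((PySem.List.enumerate xs 0).foldl solveAltStep (none, none, none, none)).2.2.2) := by
        simp only [List.foldl_cons, List.foldl_nil, solveAltStep]
        rw [if_pos hq]
      rw [hstep]
      exact ⟨GoodPL_extend_same 0 xs x _ _ hq ih0,
        GoodPL_extend_other 1 xs x _ _ (by rw [hq]; norm_num) ih1⟩
    · have hstep : List.foldl solveAltStep
          ((PySem.List.enumerate xs 0).foldl solveAltStep (none, none, none, none))
          [((xs.length : Int), x)] =
          (((PySem.List.enumerate xs 0).foldl solveAltStep (none, none, none, none)).1,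
            ((PySem.List.enumerate xs 0).foldl solveAltStep (none, none, none, none)).2.1,
            (if ((PySem.List.enumerate xs 0).foldl solveAltStep (none, none, none, none)).2.2.1.isNone
              then some (xs.length : Int)
              else ((PySem.List.enumerate xs 0).foldl solveAltStep (none, none, none, none)).2.2.1),
            some (xs.length : Int)) := by
        simp only [List.foldl_cons, List.foldl_nil, solveAltStep]
        rw [if_neg (by rw [hq]; norm_num)]
      rw [hstep]
      exact ⟨GoodPL_extend_other 0 xs x _ _ (by rw [hq]; norm_num) ih0,
        GoodPL_extend_same 1 xs x _ _ hq ih1⟩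

lemma coreA_le_init (l : List Int) : coreA l ≤ 2 ^ 32 := by
  unfold coreA
  apply foldl_contract
  intro a x
  exact foldl_minif_le_init
    (fun y => PySem.Int.mod (PySem.List.pyGetD l x 0 + PySem.List.pyGetD l y 0) 2 = 0)
    (fun y => x + (l.length : Int) - y - 1) _ a

lemma coreA_le_cand (l : List Int) (kf ke : Nat) (hkf : kf < l.length) (hke : ke < l.length)
    (hp : PySem.Int.mod (l.getD kf 0) 2 = PySem.Int.mod (l.getD ke 0) 2) :
    coreA l ≤ (kf : Int) + (l.length : Int) - (ke : Int) - 1 := by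
  unfold coreA
  have hxm : ((kf : Nat) : Int) ∈ PySem.List.pyRange 0 (l.length : Int) 1 :=
    PySem.List.mem_pyRange_one.mpr ⟨by exact_mod_cast Nat.zero_le kf, by exact_mod_cast hkf⟩
  have hym : ((ke : Nat) : Int) ∈ PySem.List.pyRange 0 (l.length : Int) 1 :=
    PySem.List.mem_pyRange_one.mpr ⟨by exact_mod_cast Nat.zero_le ke, by exact_mod_cast hke⟩
  have hC : PySem.Int.mod
      (PySem.List.pyGetD l ((kf : Nat) : Int) 0 + PySem.List.pyGetD l ((ke : Nat) : Int) 0) 2 = 0 := by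
    rw [PySem.List.pyGetD_natCast, PySem.List.pyGetD_natCast]
    exact (mod2_add _ _).mpr hp
  exact foldl_le_of_mem _ _
    (fun a x => foldl_minif_le_init
      (fun y => PySem.Int.mod (PySem.List.pyGetD l x 0 + PySem.List.pyGetD l y 0) 2 = 0)
      (fun y => x + (l.length : Int) - y - 1) _ a)
    ((kf : Nat) : Int) hxm _
    (fun a => foldl_minif_le_mem
      (fun y => PySem.Int.mod (PySem.List.pyGetD l ((kf : Nat) : Int) 0 + PySem.List.pyGetD l y 0) 2 = 0)
      (fun y => ((kf : Nat) : Int) + (l.length : Int) - y - 1) _ ((ke : Nat) : Int) hym hC a) _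

lemma coreA_cases' (l : List Int) :
    coreA l = 2 ^ 32 ∨ ∃ kx ky : Nat, kx < l.length ∧ ky < l.length ∧
      PySem.Int.mod (l.getD kx 0) 2 = PySem.Int.mod (l.getD ky 0) 2 ∧
      coreA l = (kx : Int) + (l.length : Int) - (ky : Int) - 1 := by
  have h := foldl_preserve
    (fun ans x => (PySem.List.pyRange 0 (l.length : Int) 1).foldl (fun ans y =>
      if PySem.Int.mod (PySem.List.pyGetD l x 0 + PySem.List.pyGetD l y 0) 2 = 0 then
        min ans (x + (l.length : Int) - y - 1)
      else ans) ans)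
    (fun r => ∃ x ∈ PySem.List.pyRange 0 (l.length : Int) 1,
      ∃ y ∈ PySem.List.pyRange 0 (l.length : Int) 1,
        PySem.Int.mod (PySem.List.pyGetD l x 0 + PySem.List.pyGetD l y 0) 2 = 0 ∧
        r = x + (l.length : Int) - y - 1)
    (PySem.List.pyRange 0 (l.length : Int) 1)
    (by
      intro a x hx
      rcases foldl_minif_cases
        (fun y => PySem.Int.mod (PySem.List.pyGetD l x 0 + PySem.List.pyGetD l y 0) 2 = 0)
        (fun y => x + (l.length : Int) - y - 1)
        (PySem.List.pyRange 0 (l.length : Int) 1) a with h | ⟨y, hy, hC, he⟩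
      · exact Or.inl h
      · exact Or.inr ⟨x, hx, y, hy, hC, he⟩)
    (2 ^ 32)
  rcases h with h | ⟨x, hx, y, hy, hC, he⟩
  · exact Or.inl (by unfold coreA; exact h)
  · obtain ⟨hx0, hxl⟩ := PySem.List.mem_pyRange_one.mp hx
    obtain ⟨hy0, hyl⟩ := PySem.List.mem_pyRange_one.mp hy
    have hxx : x = ((x.toNat : Nat) : Int) := (Int.toNat_of_nonneg hx0).symm
    have hyy : y = ((y.toNat : Nat) : Int) := (Int.toNat_of_nonneg hy0).symm
    rw [hxx, hyy, PySem.List.pyGetD_natCast, PySem.List.pyGetD_natCast] at hC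
    refine Or.inr ⟨x.toNat, y.toNat, by omega, by omega, (mod2_add _ _).mp hC, ?_⟩
    unfold coreA
    rw [he]; omega

lemma core_eq (l : List Int) : coreA l = coreB l := by
  obtain ⟨hg0, hg1⟩ := st_spec l
  rcases hg0 with ⟨hF0, hL0, hno0⟩ | ⟨kf0, ke0, hF0, hL0, hkf0, hke0, hpf0, hpe0, hmm0⟩ <;>
    rcases hg1 with ⟨hF1, hL1, hno1⟩ | ⟨kf1, ke1, hF1, hL1, hkf1, hke1, hpf1, hpe1, hmm1⟩
  · -- no even, no odd element: the list is empty for parity purposes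
    have hB : coreB l = 2 ^ 32 := by
      simp [coreB, hF0, hL0, hF1, hL1]
    rw [hB]
    rcases coreA_cases' l with h | ⟨kx, ky, hkx, hky, hpar, he⟩
    · exact h
    · rcases mod2_cases (l.getD kx 0) with hq | hq
      · exact absurd hq (hno0 kx hkx)
      · exact absurd hq (hno1 kx hkx)
  · -- only odd elements
    have hB : coreB l = min (2 ^ 32) ((kf1 : Int) + (l.length : Int) - 1 - (ke1 : Int)) := by
      simp [coreB, hF0, hL0, hF1, hL1]
    rw [hB]
    apply le_antisymm
    · refine le_min (coreA_le_init l) ?_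
      have := coreA_le_cand l kf1 ke1 hkf1 hke1 (by rw [hpf1, hpe1])
      omega
    · rcases coreA_cases' l with h | ⟨kx, ky, hkx, hky, hpar, he⟩
      · rw [h]; exact min_le_left _ _
      · rcases mod2_cases (l.getD kx 0) with hq | hq
        · exact absurd hq (hno0 kx hkx)
        · have h1 := hmm1 kx hkx hq
          have h2 := hmm1 ky hky (by rw [← hpar]; exact hq)
          refine le_trans (min_le_right _ _) ?_
          rw [he]; omega
  · -- only even elements
    have hB : coreB l = min (2 ^ 32) ((kf0 : Int) + (l.length : Int) - 1 - (ke0 : Int)) := by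
      simp [coreB, hF0, hL0, hF1, hL1]
    rw [hB]
    apply le_antisymm
    · refine le_min (coreA_le_init l) ?_
      have := coreA_le_cand l kf0 ke0 hkf0 hke0 (by rw [hpf0, hpe0])
      omega
    · rcases coreA_cases' l with h | ⟨kx, ky, hkx, hky, hpar, he⟩
      · rw [h]; exact min_le_left _ _
      · rcases mod2_cases (l.getD kx 0) with hq | hq
        · have h1 := hmm0 kx hkx hq
          have h2 := hmm0 ky hky (by rw [← hpar]; exact hq)
          refine le_trans (min_le_right _ _) ?_
          rw [he]; omega
        · exact absurd hq (hno1 kx hkx)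
  · -- both parities present
    have hB : coreB l = min (min (2 ^ 32) ((kf0 : Int) + (l.length : Int) - 1 - (ke0 : Int)))
        ((kf1 : Int) + (l.length : Int) - 1 - (ke1 : Int)) := by
      simp [coreB, hF0, hL0, hF1, hL1]
    rw [hB]
    apply le_antisymm
    · refine le_min (le_min (coreA_le_init l) ?_) ?_
      · have := coreA_le_cand l kf0 ke0 hkf0 hke0 (by rw [hpf0, hpe0])
        omega
      · have := coreA_le_cand l kf1 ke1 hkf1 hke1 (by rw [hpf1, hpe1])
        omega
    · rcases coreA_cases' l with h | ⟨kx, ky, hkx, hky, hpar, he⟩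
      · rw [h]; exact le_trans (min_le_left _ _) (min_le_left _ _)
      · rcases mod2_cases (l.getD kx 0) with hq | hq
        · have h1 := hmm0 kx hkx hq
          have h2 := hmm0 ky hky (by rw [← hpar]; exact hq)
          refine le_trans (le_trans (min_le_left _ _) (min_le_right _ _)) ?_
          rw [he]; omega
        · have h1 := hmm1 kx hkx hq
          have h2 := hmm1 ky hky (by rw [← hpar]; exact hq)
          refine le_trans (min_le_right _ _) ?_
          rw [he]; omega

-- ===== VERDICT (by name: the statement is the Claim_ definition above) =====
theorem solve_spec : Claim_equal_solve := by
  intro A _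
  unfold Spec_solve
  rw [solve_eq_coreA, solve_alt_eq_coreB]
  exact core_eq _
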